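-- pv_equiv track=rewrite | github.com/medulina/mindref | dockereve-master/eve-app/app.py | get_cfx_mat
-- ===== SOURCE A (Python) =====
-- from copy import deepcopy
--
-- def get_cfx_mat(truth, attempt, totaln=None):
--     x = deepcopy(truth)
--     y = deepcopy(attempt)
--     cm = {}
--     rt = 0
--     # Run through truth and add to confusion matrix
--     for ik, iv in x.items():
--         while len(iv) > 0:
--             jk, jv = iv.popitem()
--             rt += 1
--             try:
--                 yjv = y[ik].pop(jk)
--             except KeyError:
--                 yjv = 0
--             try:
--                 cm[jv][yjv] += 1
--             except KeyError:
--                 try: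
--                     cm[jv][yjv] = 1
--                 except KeyError:
--                     cm[jv] = {}
--                     cm[jv][yjv] = 1
--     # Run through remaining items in attempt and update confusion matrix
--     for ik, iv in y.items():
--         while len(iv) > 0:
--             jk, yjv = iv.popitem()
--             rt += 1
--             try:
--                 cm[0][yjv] += 1
--             except KeyError:
--                 try:
--                     cm[0][yjv] = 1
--                 except KeyError:
--                     cm[0] = {}
--                     cm[0][yjv] = 1
--     if totaln is not None:
--         cm[0][0] = totaln-rt
--     return cm
-- ===== SOURCE B (Python) =====
-- def get_cfx_mat(truth, attempt, totaln=None):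
--     # Pure two-pass rewrite: no deepcopies, no destructive pops; reversed()
--     # preserves the original's popitem (LIFO) row ordering.
--     cm = {}
--     rt = 0
--     for ik, iv in truth.items():
--         for jk, jv in reversed(iv.items()):
--             rt += 1
--             yjv = attempt.get(ik, {}).get(jk, 0)
--             row = cm.setdefault(jv, {})
--             row[yjv] = row.get(yjv, 0) + 1
--     for ik, iv in attempt.items():
--         for jk, yjv in reversed(iv.items()):
--             if ik in truth and jk in truth[ik]:
--                 continue  # matched in the first pass
--             rt += 1
--             row = cm.setdefault(0, {})
--             row[yjv] = row.get(yjv, 0) + 1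
--     if totaln is not None:
--         row = cm.setdefault(0, {})
--         row[0] = totaln - rt
--     return cm
-- ===== Notes on version B (the rewrite author's own statement) =====
-- stated objective: simpler
-- what changed: Replaced the deepcopy-and-destructively-consume algorithm (popitem/pop with try/except mutation of copies) by a pure two-pass read-only scan: pass 1 counts every truth entry against an immutable attempt lookup, pass 2 counts attempt entries that a membership test says were not matched in truth.
-- crash fix: When totaln is not None but 0 never became a key of cm (no truth label equals 0 and every attempt entry is matched by truth), A raises KeyError at cm[0][0] = totaln-rt; B creates the row and returns cm with cm[0] = {0: totaln-rt}. — e.g. on get_cfx_mat([("a", [("x", 1)])], [("a", [("x", 1)])], some 5): A raises KeyError, B returns [(1, [(1, 1)]), (0, [(0, 4)])]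
import Mathlib
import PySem

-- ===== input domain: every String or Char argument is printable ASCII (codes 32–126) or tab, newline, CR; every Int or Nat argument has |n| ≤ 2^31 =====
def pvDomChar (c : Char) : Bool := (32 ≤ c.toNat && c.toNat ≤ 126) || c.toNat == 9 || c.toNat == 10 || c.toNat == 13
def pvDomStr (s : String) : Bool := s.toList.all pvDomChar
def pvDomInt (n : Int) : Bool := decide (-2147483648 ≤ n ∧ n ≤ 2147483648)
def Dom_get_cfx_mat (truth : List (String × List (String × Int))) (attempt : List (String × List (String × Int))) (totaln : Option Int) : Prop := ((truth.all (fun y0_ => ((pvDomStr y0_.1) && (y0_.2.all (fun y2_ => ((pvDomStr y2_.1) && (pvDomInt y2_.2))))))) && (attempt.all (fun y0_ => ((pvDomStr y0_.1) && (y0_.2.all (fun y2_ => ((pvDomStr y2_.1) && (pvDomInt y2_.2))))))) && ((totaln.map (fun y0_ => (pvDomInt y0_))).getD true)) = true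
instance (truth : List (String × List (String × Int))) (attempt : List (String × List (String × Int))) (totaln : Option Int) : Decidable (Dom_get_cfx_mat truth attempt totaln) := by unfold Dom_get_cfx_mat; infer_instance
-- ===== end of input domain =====

-- B replaces A's deepcopy-and-destructively-consume loops (popitem/pop with try/except)
-- by a pure two-pass read-only scan with a membership test; equal output (rows in A's order).


-- ===== PORT A =====
-- the try/except chain  cm[jv][yjv] += 1 / cm[jv][yjv] = 1 / cm[jv] = {}; cm[jv][yjv] = 1
def pvBumpA (cm : PySem.Dict Int (PySem.Dict Int Int)) (jv yjv : Int) :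
    PySem.Dict Int (PySem.Dict Int Int) :=
  match cm.get? jv with
  | some row =>
    match row.get? yjv with
    | some c => cm.insert jv (row.insert yjv (c + 1))
    | none   => cm.insert jv (row.insert yjv 1)
  | none => cm.insert jv ((PySem.Dict.empty).insert yjv 1)

-- 'while len(iv) > 0: jk, jv = iv.popitem(); ...' — popitem yields the items
-- last-to-first, so this loop is invoked on iv.items.reverse; it threads the
-- mutated y through:  try: yjv = y[ik].pop(jk)  except KeyError: yjv = 0
def pvALoop1 (ik : String) (l : List (String × Int))
    (s : PySem.Dict String (PySem.Dict String Int) × PySem.Dict Int (PySem.Dict Int Int) × Int) :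
    PySem.Dict String (PySem.Dict String Int) × PySem.Dict Int (PySem.Dict Int Int) × Int :=
  match l, s with
  | [], s => s
  | (jk, jv) :: rest, (y, cm, rt) =>
    match y.get? ik with
    | some d =>
      match d.get? jk with
      | some v => pvALoop1 ik rest (y.insert ik (d.erase jk), pvBumpA cm jv v, rt + 1)
      | none   => pvALoop1 ik rest (y, pvBumpA cm jv 0, rt + 1)
    | none => pvALoop1 ik rest (y, pvBumpA cm jv 0, rt + 1)

def get_cfx_mat (truth : List (String × List (String × Int))) (attempt : List (String × List (String × Int))) (totaln : Option Int) : List (Int × List (Int × Int)) :=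
  -- x = deepcopy(truth); y = deepcopy(attempt)
  let x : PySem.Dict String (PySem.Dict String Int) :=
    PySem.Dict.mk (truth.map (fun p => (p.1, PySem.Dict.mk p.2)))
  let y : PySem.Dict String (PySem.Dict String Int) :=
    PySem.Dict.mk (attempt.map (fun p => (p.1, PySem.Dict.mk p.2)))
  -- first loop: over x.items(), consuming each inner dict by popitem
  let s1 := x.items.foldl (fun s p => pvALoop1 p.1 p.2.items.reverse s)
    (y, (PySem.Dict.empty : PySem.Dict Int (PySem.Dict Int Int)), (0 : Int))
  -- second loop: over what is left in y, again popitem (last-to-first)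
  let s2 := s1.1.items.foldl
    (fun s p => p.2.items.reverse.foldl (fun t q => (pvBumpA t.1 0 q.2, t.2 + 1)) s)
    (s1.2.1, s1.2.2)
  match totaln with
  | some t =>
    match s2.1.get? 0 with
    | some row => ((s2.1.insert 0 (row.insert 0 (t - s2.2))).items.map (fun p => (p.1, p.2.items)))
    | none => []   -- Python raises KeyError at 'cm[0][0] = totaln-rt' here: excluded by Pre_
  | none => s2.1.items.map (fun p => (p.1, p.2.items))

-- ===== PORT B =====
-- row = cm.setdefault(jv, {}); row[yjv] = row.get(yjv, 0) + 1
def pvBumpB (cm : PySem.Dict Int (PySem.Dict Int Int)) (jv yjv : Int) :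
    PySem.Dict Int (PySem.Dict Int Int) :=
  let row := cm.getD jv PySem.Dict.empty
  cm.insert jv (row.insert yjv (row.getD yjv 0 + 1))

-- 'ik in truth and jk in truth[ik]'
def pvMatchedB (tr : PySem.Dict String (PySem.Dict String Int)) (ik jk : String) : Bool :=
  match tr.get? ik with
  | some tiv => (tiv.get? jk).isSome
  | none => false

-- pass 1 inner loop: for jk, jv in reversed(iv.items()): ...
def pvBLoop1 (att : PySem.Dict String (PySem.Dict String Int)) (ik : String)
    (l : List (String × Int)) (s : PySem.Dict Int (PySem.Dict Int Int) × Int) :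
    PySem.Dict Int (PySem.Dict Int Int) × Int :=
  l.foldl (fun t q =>
    (pvBumpB t.1 q.2 ((att.getD ik PySem.Dict.empty).getD q.1 0), t.2 + 1)) s

-- pass 2 inner loop: skip entries matched in truth, count the rest
def pvBLoop2 (tr : PySem.Dict String (PySem.Dict String Int)) (ik : String)
    (l : List (String × Int)) (s : PySem.Dict Int (PySem.Dict Int Int) × Int) :
    PySem.Dict Int (PySem.Dict Int Int) × Int :=
  l.foldl (fun t q =>
    if pvMatchedB tr ik q.1 then t else (pvBumpB t.1 0 q.2, t.2 + 1)) s

def get_cfx_mat_alt (truth : List (String × List (String × Int))) (attempt : List (String × List (String × Int))) (totaln : Option Int) : List (Int × List (Int × Int)) :=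
  let tr : PySem.Dict String (PySem.Dict String Int) :=
    PySem.Dict.mk (truth.map (fun p => (p.1, PySem.Dict.mk p.2)))
  let att : PySem.Dict String (PySem.Dict String Int) :=
    PySem.Dict.mk (attempt.map (fun p => (p.1, PySem.Dict.mk p.2)))
  let s1 := truth.foldl (fun s p => pvBLoop1 att p.1 p.2.reverse s)
    ((PySem.Dict.empty : PySem.Dict Int (PySem.Dict Int Int)), (0 : Int))
  let s2 := attempt.foldl (fun s p => pvBLoop2 tr p.1 p.2.reverse s) s1
  let cm := match totaln with
    | some t =>
      -- row = cm.setdefault(0, {}); row[0] = totaln - rt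
      let row := s2.1.getD 0 PySem.Dict.empty
      s2.1.insert 0 (row.insert 0 (t - s2.2))
    | none => s2.1
  cm.items.map (fun p => (p.1, p.2.items))

-- ===== PRECONDITION & SPEC =====
-- 'truth entry (k, jk) matches attempt entry under key k': used by Pre_ below and by the proofs
def pvMatchedIn (ts : List (String × List (String × Int))) (k jk : String) : Bool :=
  ts.any (fun p => p.1 == k && (p.2.map Prod.fst).contains jk)

-- '0 becomes a key of cm': some truth label is 0, or some attempt entry is unmatched
def pvHitsZero (truth attempt : List (String × List (String × Int))) : Bool :=
  truth.any (fun p => p.2.any (fun q => q.2 == 0)) ||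
  attempt.any (fun p => p.2.any (fun q => !pvMatchedIn truth p.1 q.1))

-- Pre_ excludes (a) association lists with duplicate keys at either level — those do not
-- represent Python dicts, the declared argument type — and (b) inputs on which A raises
-- KeyError at the final 'cm[0][0] = totaln-rt' because 0 never became a key of cm.
def Pre_get_cfx_mat (truth : List (String × List (String × Int))) (attempt : List (String × List (String × Int))) (totaln : Option Int) : Prop :=
  (truth.map Prod.fst).Nodup ∧ (attempt.map Prod.fst).Nodup ∧
  (∀ p ∈ truth, (p.2.map Prod.fst).Nodup) ∧ (∀ p ∈ attempt, (p.2.map Prod.fst).Nodup) ∧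
  (totaln = none ∨ pvHitsZero truth attempt = true)
instance (truth : List (String × List (String × Int))) (attempt : List (String × List (String × Int))) (totaln : Option Int) : Decidable (Pre_get_cfx_mat truth attempt totaln) := by unfold Pre_get_cfx_mat; infer_instance

def pvWitness_get_cfx_mat : (List (String × List (String × Int))) × (List (String × List (String × Int))) × Option Int :=
  ([("a", [("x", 0)])], [("a", [("x", 1), ("y", 2)])], some 7)

-- When totaln is not None but 0 never became a key of cm (no truth label is 0 and every
-- attempt entry is matched in truth), A raises KeyError at 'cm[0][0] = totaln-rt';
-- B creates the row and returns cm with cm[0] = {0: totaln-rt}.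
def Raises_get_cfx_mat (truth : List (String × List (String × Int))) (attempt : List (String × List (String × Int))) (totaln : Option Int) : Prop :=
  (truth.map Prod.fst).Nodup ∧ (attempt.map Prod.fst).Nodup ∧
  (∀ p ∈ truth, (p.2.map Prod.fst).Nodup) ∧ (∀ p ∈ attempt, (p.2.map Prod.fst).Nodup) ∧
  totaln ≠ none ∧ pvHitsZero truth attempt = false
instance (truth : List (String × List (String × Int))) (attempt : List (String × List (String × Int))) (totaln : Option Int) : Decidable (Raises_get_cfx_mat truth attempt totaln) := by unfold Raises_get_cfx_mat; infer_instance

def pvRaiseWitness_get_cfx_mat : (List (String × List (String × Int))) × (List (String × List (String × Int))) × Option Int :=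
  ([("a", [("x", 1)])], [("a", [("x", 1)])], some 5)

def pvRaiseWitnessOut_get_cfx_mat : List (Int × List (Int × Int)) := [(1, [(1, 1)]), (0, [(0, 4)])]

def Spec_get_cfx_mat (truth : List (String × List (String × Int))) (attempt : List (String × List (String × Int))) (totaln : Option Int) (out : List (Int × List (Int × Int))) : Prop := out = get_cfx_mat_alt truth attempt totaln
instance (truth : List (String × List (String × Int))) (attempt : List (String × List (String × Int))) (totaln : Option Int) (out : List (Int × List (Int × Int))) : Decidable (Spec_get_cfx_mat truth attempt totaln out) := by unfold Spec_get_cfx_mat; infer_instance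

-- ===== CLAIM (what is proved, stated in full; the proofs are below) =====
def Claim_equal_get_cfx_mat : Prop := ∀ (truth : List (String × List (String × Int))) (attempt : List (String × List (String × Int))) (totaln : Option Int), Dom_get_cfx_mat truth attempt totaln → Pre_get_cfx_mat truth attempt totaln → Spec_get_cfx_mat truth attempt totaln (get_cfx_mat truth attempt totaln)

def Claim_raises_get_cfx_mat : Prop := (∀ (truth : List (String × List (String × Int))) (attempt : List (String × List (String × Int))) (totaln : Option Int), Dom_get_cfx_mat truth attempt totaln → Raises_get_cfx_mat truth attempt totaln → ¬ Pre_get_cfx_mat truth attempt totaln) ∧ (Dom_get_cfx_mat (pvRaiseWitness_get_cfx_mat.1) (pvRaiseWitness_get_cfx_mat.2.1) (pvRaiseWitness_get_cfx_mat.2.2) ∧ Raises_get_cfx_mat (pvRaiseWitness_get_cfx_mat.1) (pvRaiseWitness_get_cfx_mat.2.1) (pvRaiseWitness_get_cfx_mat.2.2) ∧ get_cfx_mat_alt (pvRaiseWitness_get_cfx_mat.1) (pvRaiseWitness_get_cfx_mat.2.1) (pvRaiseWitness_get_cfx_mat.2.2) = pvRaiseWitnessOut_get_cfx_mat)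

-- ===== LEMMAS AND PROOFS =====

lemma pvBump_eq (cm : PySem.Dict Int (PySem.Dict Int Int)) (jv yjv : Int) :
    pvBumpB cm jv yjv = pvBumpA cm jv yjv := by
  unfold pvBumpA pvBumpB
  cases h : cm.get? jv with
  | none => simp [PySem.Dict.getD, h]
  | some row =>
    cases h2 : row.get? yjv with
    | none => simp [PySem.Dict.getD, h, h2]
    | some c => simp [PySem.Dict.getD, h, h2]

-- the dict views of the inputs, as the ports build them
def pvDictOf (l : List (String × List (String × Int))) : PySem.Dict String (PySem.Dict String Int) :=
  PySem.Dict.mk (l.map (fun p => (p.1, PySem.Dict.mk p.2)))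

-- A's y after erasing, from each inner dict, the keys a filter F rejects
def pvYOf (att : List (String × List (String × Int))) (F : String → String → Bool) :
    PySem.Dict String (PySem.Dict String Int) :=
  PySem.Dict.mk (att.map (fun p => (p.1, PySem.Dict.mk (p.2.filter (fun q => F p.1 q.1)))))

lemma pvGet?_mk_map {ν μ : Type} (l : List (String × ν)) (h : String → ν → μ) (k : String) :
    (PySem.Dict.mk (l.map (fun p => (p.1, h p.1 p.2)))).get? k
      = ((PySem.Dict.mk l).get? k).map (h k) := by
  induction l with
  | nil => simp [PySem.Dict.get?]
  | cons a t ih =>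
    obtain ⟨a1, a2⟩ := a
    by_cases hk : a1 = k
    · subst hk; simp [PySem.Dict.get?_mk_cons]
    · have hb : (a1 == k) = false := beq_eq_false_iff_ne.mpr hk
      simp [PySem.Dict.get?_mk_cons, hb, ih]

lemma pvGet?_mk_filter {ν : Type} (l : List (String × ν)) (p : String → Bool) (k : String) :
    (PySem.Dict.mk (l.filter (fun q => p q.1))).get? k
      = if p k then (PySem.Dict.mk l).get? k else none := by
  induction l with
  | nil => simp [PySem.Dict.get?]
  | cons a t ih =>
    obtain ⟨a1, a2⟩ := a
    by_cases hk : a1 = k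
    · subst hk
      by_cases hp : p a1 <;> simp [hp, PySem.Dict.get?_mk_cons, ih]
    · have hb : (a1 == k) = false := beq_eq_false_iff_ne.mpr hk
      by_cases hp : p a1 <;> simp [hp, PySem.Dict.get?_mk_cons, hb, ih]

lemma pvGet?_mk_eq_none {ν : Type} (l : List (String × ν)) (k : String)
    (h : (PySem.Dict.mk l).get? k = none) : ∀ q ∈ l, (q.1 == k) = false := by
  induction l with
  | nil => intro q hq; cases hq
  | cons a t ih =>
    obtain ⟨a1, a2⟩ := a
    rw [PySem.Dict.get?_mk_cons] at h
    by_cases ha : (a1 == k) = true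
    · simp [ha] at h
    · intro q hq
      rcases List.mem_cons.mp hq with rfl | hq'
      · simpa using Bool.eq_false_iff.mpr ha
      · exact ih (by simpa [ha] using h) q hq'

lemma pvGet?_mk_isSome {ν : Type} (l : List (String × ν)) (k : String) :
    ((PySem.Dict.mk l).get? k).isSome = (l.map Prod.fst).contains k := by
  induction l with
  | nil => simp [PySem.Dict.get?]
  | cons a t ih =>
    obtain ⟨a1, a2⟩ := a
    by_cases hk : a1 = k
    · subst hk; simp [PySem.Dict.get?_mk_cons]
    · have hb : (a1 == k) = false := beq_eq_false_iff_ne.mpr hk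
      have hb' : (k == a1) = false := beq_eq_false_iff_ne.mpr (Ne.symm hk)
      simp [PySem.Dict.get?_mk_cons, hb, hb', ih]

lemma pvDictOf_get? (l : List (String × List (String × Int))) (k : String) :
    (pvDictOf l).get? k = ((PySem.Dict.mk l).get? k).map PySem.Dict.mk :=
  pvGet?_mk_map l (fun _ d => PySem.Dict.mk d) k

lemma pvYOf_get? (att : List (String × List (String × Int))) (F : String → String → Bool) (k : String) :
    (pvYOf att F).get? k
      = ((PySem.Dict.mk att).get? k).map (fun dl => PySem.Dict.mk (dl.filter (fun q => F k q.1))) :=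
  pvGet?_mk_map att (fun k dl => PySem.Dict.mk (dl.filter (fun q => F k q.1))) k

lemma pvDict_ext {κ ν : Type} (d e : PySem.Dict κ ν) (h : d.items = e.items) : d = e := by
  cases d; cases e; simpa using h

lemma pvYOf_congr (att : List (String × List (String × Int))) (F F' : String → String → Bool)
    (h : ∀ p ∈ att, ∀ q ∈ p.2, F p.1 q.1 = F' p.1 q.1) :
    pvYOf att F = pvYOf att F' := by
  unfold pvYOf
  congr 1
  apply List.map_congr_left
  intro p hp
  have : p.2.filter (fun q => F p.1 q.1) = p.2.filter (fun q => F' p.1 q.1) :=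
    List.filter_congr (fun q hq => h p hp q hq)
  rw [this]

lemma pvYOf_insert_aux (F F' : String → String → Bool) (k0 : String) (dl0 : List (String × Int))
    (hagree : ∀ k, k ≠ k0 → F' k = F k) :
    ∀ (att : List (String × List (String × Int))),
    (att.map Prod.fst).Nodup →
    (PySem.Dict.mk att).get? k0 = some dl0 →
    att.map (fun p => if (p.1 == k0) = true
        then (k0, PySem.Dict.mk (dl0.filter (fun q => F' k0 q.1)))
        else (p.1, PySem.Dict.mk (p.2.filter (fun q => F p.1 q.1))))
      = att.map (fun p => (p.1, PySem.Dict.mk (p.2.filter (fun q => F' p.1 q.1)))) := by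
  intro att
  induction att with
  | nil => intro _ _; rfl
  | cons a t ih =>
    intro hnd hmem
    obtain ⟨a1, a2⟩ := a
    rw [PySem.Dict.get?_mk_cons] at hmem
    rw [List.map_cons, List.map_cons]
    by_cases hk : a1 = k0
    · subst hk
      have ha2 : a2 = dl0 := by simpa using hmem
      subst ha2
      have hknot : a1 ∉ t.map Prod.fst := (List.nodup_cons.mp (by simpa using hnd)).1
      congr 1
      · simp
      · apply List.map_congr_left
        intro p hp
        have hpne : p.1 ≠ a1 := fun e => hknot (e ▸ List.mem_map_of_mem hp)
        simp [beq_eq_false_iff_ne.mpr hpne, hagree p.1 hpne]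
    · have hb : (a1 == k0) = false := beq_eq_false_iff_ne.mpr hk
      have hmem' : (PySem.Dict.mk t).get? k0 = some dl0 := by simpa [hb] using hmem
      have hnd' : (t.map Prod.fst).Nodup := (List.nodup_cons.mp (by simpa using hnd)).2
      rw [ih hnd' hmem']
      congr 1
      simp [hb, hagree a1 hk]

lemma pvYOf_insert (att : List (String × List (String × Int))) (F F' : String → String → Bool)
    (k0 : String) (dl0 : List (String × Int))
    (hnd : (att.map Prod.fst).Nodup)
    (hmem : (PySem.Dict.mk att).get? k0 = some dl0)
    (hagree : ∀ k, k ≠ k0 → F' k = F k) :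
    (pvYOf att F).insert k0 (PySem.Dict.mk (dl0.filter (fun q => F' k0 q.1))) = pvYOf att F' := by
  have hc : (pvYOf att F).contains k0 = true := by
    rw [PySem.Dict.contains_eq_isSome_get?, pvYOf_get?, hmem]; rfl
  apply pvDict_ext
  rw [PySem.Dict.items_insert_of_contains _ _ hc]
  show ((att.map (fun p => (p.1, PySem.Dict.mk (p.2.filter (fun q => F p.1 q.1))))).map
        (fun p => if (p.1 == k0) = true then (k0, PySem.Dict.mk (dl0.filter (fun q => F' k0 q.1))) else p))
      = att.map (fun p => (p.1, PySem.Dict.mk (p.2.filter (fun q => F' p.1 q.1))))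
  rw [List.map_map]
  exact pvYOf_insert_aux F F' k0 dl0 hagree att hnd hmem

lemma pvBLoop1_cons (att : PySem.Dict String (PySem.Dict String Int)) (ik : String)
    (q : String × Int) (rest : List (String × Int)) (s : PySem.Dict Int (PySem.Dict Int Int) × Int) :
    pvBLoop1 att ik (q :: rest) s
      = pvBLoop1 att ik rest (pvBumpB s.1 q.2 ((att.getD ik PySem.Dict.empty).getD q.1 0), s.2 + 1) := rfl

lemma pvBLoop2_cons (tr : PySem.Dict String (PySem.Dict String Int)) (ik : String)
    (q : String × Int) (rest : List (String × Int)) (s : PySem.Dict Int (PySem.Dict Int Int) × Int) :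
    pvBLoop2 tr ik (q :: rest) s
      = pvBLoop2 tr ik rest (if pvMatchedB tr ik q.1 then s else (pvBumpB s.1 0 q.2, s.2 + 1)) := rfl

lemma pvALoop1_absent (att0 : List (String × List (String × Int))) (ik : String)
    (hik : (PySem.Dict.mk att0).get? ik = none) :
    ∀ (l : List (String × Int)) (y : PySem.Dict String (PySem.Dict String Int)) cm rt,
    y.get? ik = none →
    pvALoop1 ik l (y, cm, rt) = (y, pvBLoop1 (pvDictOf att0) ik l (cm, rt)) := by
  intro l
  induction l with
  | nil => intro y cm rt hy; rfl
  | cons q rest ih =>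
    intro y cm rt hy
    obtain ⟨jk, jv⟩ := q
    have h1 : (pvDictOf att0).getD ik PySem.Dict.empty = PySem.Dict.empty := by
      simp [PySem.Dict.getD, pvDictOf_get?, hik]
    have hyjv : ((pvDictOf att0).getD ik PySem.Dict.empty).getD jk (0 : Int) = 0 := by
      rw [h1]; rfl
    rw [pvBLoop1_cons]
    simp only [pvALoop1, hy]
    rw [ih _ _ _ hy]
    simp [hyjv, pvBump_eq]

lemma pvALoop1_present (att0 : List (String × List (String × Int))) (ik : String)
    (dl0 : List (String × Int))
    (hndA : (att0.map Prod.fst).Nodup)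
    (hik : (PySem.Dict.mk att0).get? ik = some dl0) :
    ∀ (l : List (String × Int)), (l.map Prod.fst).Nodup →
    ∀ (F : String → String → Bool) cm rt,
    (∀ jk ∈ l.map Prod.fst, F ik jk = true) →
    pvALoop1 ik l (pvYOf att0 F, cm, rt)
      = (pvYOf att0 (fun k jk => F k jk && !((k == ik) && (l.map Prod.fst).contains jk)),
         pvBLoop1 (pvDictOf att0) ik l (cm, rt)) := by
  intro l
  induction l with
  | nil =>
    intro _ F cm rt _
    simp only [List.map_nil, List.elem_nil, Bool.and_false, Bool.not_false,
      Bool.and_true]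
    rfl
  | cons q rest ih =>
    rintro hnd F cm rt hkeep
    obtain ⟨jk, jv⟩ := q
    have hFik : F ik jk = true := hkeep jk (by simp)
    have hndr : (rest.map Prod.fst).Nodup := by
      rw [List.map_cons] at hnd; exact (List.nodup_cons.mp hnd).2
    have hjknot : jk ∉ rest.map Prod.fst := by
      rw [List.map_cons] at hnd; exact (List.nodup_cons.mp hnd).1
    have hy : (pvYOf att0 F).get? ik
        = some (PySem.Dict.mk (dl0.filter (fun q => F ik q.1))) := by
      rw [pvYOf_get?, hik]; rfl
    have hfg : (PySem.Dict.mk (dl0.filter (fun q => F ik q.1))).get? jk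
        = (PySem.Dict.mk dl0).get? jk := by
      rw [pvGet?_mk_filter]; simp [hFik]
    set F₁ : String → String → Bool :=
      fun k jk' => F k jk' && !((k == ik) && (jk' == jk)) with hF₁def
    have hkeep₁ : ∀ jk' ∈ rest.map Prod.fst, F₁ ik jk' = true := by
      intro jk' h'
      have h1 : F ik jk' = true := hkeep jk' (by simp [h'])
      have h2 : jk' ≠ jk := fun e => hjknot (e ▸ h')
      simp [hF₁def, h1, beq_eq_false_iff_ne.mpr h2]
    have hfin : (fun k jk' => F₁ k jk' && !((k == ik) && (rest.map Prod.fst).contains jk'))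
        = (fun k jk' => F k jk'
            && !((k == ik) && ((((jk, jv) : String × Int) :: rest).map Prod.fst).contains jk')) := by
      funext k jk'
      simp only [hF₁def, List.map_cons, List.contains_cons]
      cases (k == ik) <;> cases (jk' == jk) <;> cases F k jk'
        <;> cases ((rest.map Prod.fst).contains jk') <;> rfl
    have hbs : ∀ v : Int, (PySem.Dict.mk dl0).get? jk = some v →
        ((pvDictOf att0).getD ik PySem.Dict.empty).getD jk (0 : Int) = v := by
      intro v hv
      simp [PySem.Dict.getD, pvDictOf_get?, hik, hv]
    cases hv : (PySem.Dict.mk dl0).get? jk with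
    | some v =>
      have herase : (PySem.Dict.mk (dl0.filter (fun q => F ik q.1))).erase jk
          = PySem.Dict.mk (dl0.filter (fun q => F₁ ik q.1)) := by
        show PySem.Dict.mk ((dl0.filter (fun q => F ik q.1)).filter (fun p => !(p.1 == jk)))
          = PySem.Dict.mk (dl0.filter (fun q => F₁ ik q.1))
        rw [List.filter_filter]
        congr 1
        apply List.filter_congr
        intro q _
        simp only [hF₁def]
        cases (q.1 == jk) <;> cases F ik q.1 <;> simp
      have hins : (pvYOf att0 F).insert ik (PySem.Dict.mk (dl0.filter (fun q => F₁ ik q.1)))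
          = pvYOf att0 F₁ :=
        pvYOf_insert att0 F F₁ ik dl0 hndA hik
          (fun k hk => by funext jk'; simp [hF₁def, beq_eq_false_iff_ne.mpr hk])
      simp only [pvALoop1, hy, hfg, hv]
      rw [herase, hins, ih hndr F₁ (pvBumpA cm jv v) (rt + 1) hkeep₁, hfin,
        pvBLoop1_cons]
      rw [hbs v hv, pvBump_eq]
    | none =>
      have hnokey : ∀ q ∈ dl0, (q.1 == jk) = false := pvGet?_mk_eq_none dl0 jk hv
      have hcongr : pvYOf att0 F = pvYOf att0 F₁ := by
        apply pvYOf_congr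
        intro p hp q hq
        by_cases hpk : p.1 = ik
        · have hget : (PySem.Dict.mk att0).get? p.1 = some p.2 :=
            PySem.Dict.get?_of_mem_items (PySem.Dict.mk att0) (by simpa using hp)
              (by simpa [PySem.Dict.keys] using hndA)
          rw [hpk, hik] at hget
          have hp2 : p.2 = dl0 := by injection hget with h; exact h.symm
          have hqne : (q.1 == jk) = false := hnokey q (hp2 ▸ hq)
          simp [hF₁def, hqne]
        · simp [hF₁def, beq_eq_false_iff_ne.mpr hpk]
      simp only [pvALoop1, hy, hfg, hv]
      rw [hcongr, ih hndr F₁ (pvBumpA cm jv 0) (rt + 1) hkeep₁, hfin, pvBLoop1_cons]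
      have h0 : ((pvDictOf att0).getD ik PySem.Dict.empty).getD jk (0 : Int) = 0 := by
        simp [PySem.Dict.getD, pvDictOf_get?, hik, hv]
      rw [h0, pvBump_eq]

lemma pvMatchedIn_not_mem (ts : List (String × List (String × Int))) (k jk : String)
    (h : k ∉ ts.map Prod.fst) : pvMatchedIn ts k jk = false := by
  unfold pvMatchedIn
  rw [List.any_eq_false]
  intro p hp
  have hne : p.1 ≠ k := fun e => h (e ▸ List.mem_map_of_mem hp)
  simp [beq_eq_false_iff_ne.mpr hne]

lemma pvMatchedIn_cons (a : String × List (String × Int)) (ts : List (String × List (String × Int))) (k jk : String) :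
    pvMatchedIn (a :: ts) k jk
      = (((a.1 == k) && ((a.2.map Prod.fst).contains jk)) || pvMatchedIn ts k jk) := by
  simp [pvMatchedIn]

lemma pvPass1 (att0 : List (String × List (String × Int)))
    (hndA : (att0.map Prod.fst).Nodup) :
    ∀ (ts : List (String × List (String × Int))),
      (ts.map Prod.fst).Nodup →
      (∀ p ∈ ts, (p.2.map Prod.fst).Nodup) →
      ∀ (F : String → String → Bool) cm rt,
      (∀ p ∈ ts, ∀ jk, F p.1 jk = true) →
      ts.foldl (fun s p => pvALoop1 p.1 p.2.reverse s) (pvYOf att0 F, cm, rt)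
        = (pvYOf att0 (fun k jk => F k jk && !(pvMatchedIn ts k jk)),
           ts.foldl (fun s p => pvBLoop1 (pvDictOf att0) p.1 p.2.reverse s) (cm, rt)) := by
  intro ts
  induction ts with
  | nil =>
    intro _ _ F cm rt _
    simp only [List.foldl_nil, pvMatchedIn, List.any_nil, Bool.not_false, Bool.and_true]
  | cons a rest ih =>
    intro hnd hndi F cm rt hF
    have hnda : (a.1 :: rest.map Prod.fst).Nodup := by simpa using hnd
    have hanot : a.1 ∉ rest.map Prod.fst := (List.nodup_cons.mp hnda).1
    have hndr : (rest.map Prod.fst).Nodup := (List.nodup_cons.mp hnda).2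
    rw [List.foldl_cons, List.foldl_cons]
    cases hik : (PySem.Dict.mk att0).get? a.1 with
    | none =>
      have hyn : (pvYOf att0 F).get? a.1 = none := by rw [pvYOf_get?, hik]; rfl
      rw [pvALoop1_absent att0 a.1 hik a.2.reverse _ cm rt hyn]
      rw [ih hndr (fun p hp => hndi p (List.mem_cons_of_mem a hp)) F _ _
        (fun p hp jk => hF p (List.mem_cons_of_mem a hp) jk)]
      have hcong : pvYOf att0 (fun k jk => F k jk && !(pvMatchedIn rest k jk))
          = pvYOf att0 (fun k jk => F k jk && !(pvMatchedIn (a :: rest) k jk)) := by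
        apply pvYOf_congr
        intro p hp q _
        have hpne : p.1 ≠ a.1 := by
          intro e
          have := pvGet?_mk_eq_none att0 a.1 hik p hp
          simp [e] at this
        rw [pvMatchedIn_cons a rest p.1 q.1]
        simp [beq_eq_false_iff_ne.mpr (Ne.symm hpne)]
      rw [hcong]
    | some dl0 =>
      have hrev : ((a.2.reverse).map Prod.fst).Nodup := by
        rw [List.map_reverse, List.nodup_reverse]; exact hndi a List.mem_cons_self
      rw [pvALoop1_present att0 a.1 dl0 hndA hik a.2.reverse hrev F cm rt
        (fun jk _ => hF a List.mem_cons_self jk)]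
      set F₂ : String → String → Bool :=
        fun k jk => F k jk && !((k == a.1) && ((a.2.reverse.map Prod.fst).contains jk)) with hF₂def
      have hF₂ : ∀ p ∈ rest, ∀ jk, F₂ p.1 jk = true := by
        intro p hp jk
        have hpne : p.1 ≠ a.1 := fun e => hanot (e ▸ List.mem_map_of_mem hp)
        simp [hF₂def, hF p (List.mem_cons_of_mem a hp) jk, beq_eq_false_iff_ne.mpr hpne]
      rw [ih hndr (fun p hp => hndi p (List.mem_cons_of_mem a hp)) F₂ _ _ hF₂]
      have hfin : (fun k jk => F₂ k jk && !(pvMatchedIn rest k jk))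
          = (fun k jk => F k jk && !(pvMatchedIn (a :: rest) k jk)) := by
        funext k jk
        rw [pvMatchedIn_cons a rest k jk]
        have hcontains : ((a.2.reverse.map Prod.fst).contains jk) = ((a.2.map Prod.fst).contains jk) := by
          rw [List.map_reverse]
          cases h : (a.2.map Prod.fst).contains jk
          · simp only [List.contains_eq_mem] at *
            simpa using h
          · simp only [List.contains_eq_mem] at *
            simpa using h
        have hbeq : (k == a.1) = (a.1 == k) := Bool.beq_comm
        rw [hF₂def]
        simp only [hcontains, hbeq]
        cases (a.1 == k) <;> cases (a.2.map Prod.fst).contains jk <;> cases F k jk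
          <;> cases pvMatchedIn rest k jk <;> rfl
      rw [hfin]

lemma pvMatchedB_eq (truth : List (String × List (String × Int))) :
    (truth.map Prod.fst).Nodup → ∀ (k jk : String),
    pvMatchedB (pvDictOf truth) k jk = pvMatchedIn truth k jk := by
  induction truth with
  | nil => intro _ k jk; rfl
  | cons a t ih =>
    intro hnd k jk
    have hnda : (a.1 :: t.map Prod.fst).Nodup := by simpa using hnd
    have hanot : a.1 ∉ t.map Prod.fst := (List.nodup_cons.mp hnda).1
    have hndt : (t.map Prod.fst).Nodup := (List.nodup_cons.mp hnda).2
    rw [pvMatchedIn_cons]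
    unfold pvMatchedB
    rw [pvDictOf_get?, PySem.Dict.get?_mk_cons]
    by_cases hk : a.1 = k
    · subst hk
      rw [pvMatchedIn_not_mem t a.1 jk hanot]
      simp [pvGet?_mk_isSome]
    · have hb : (a.1 == k) = false := beq_eq_false_iff_ne.mpr hk
      have hr := ih hndt k jk
      unfold pvMatchedB at hr
      rw [pvDictOf_get?] at hr
      simp only [hb, Bool.false_eq_true, if_false, hr, Bool.false_and, Bool.false_or]

lemma pvBumpB_contains0 (cm : PySem.Dict Int (PySem.Dict Int Int)) (jv yjv : Int)
    (h : (jv = 0) ∨ cm.contains 0 = true) : (pvBumpB cm jv yjv).contains 0 = true := by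
  rw [pvBump_eq]
  unfold pvBumpA
  rcases h with rfl | h
  · cases h1 : cm.get? (0:Int) with
    | none => simp
    | some row => cases h2 : row.get? yjv <;> simp [h2]
  · cases h1 : cm.get? jv with
    | none => simp [PySem.Dict.contains_insert, h]
    | some row => cases h2 : row.get? yjv <;> simp [h2, PySem.Dict.contains_insert, h]

lemma pvBLoop1_mono0 (att : PySem.Dict String (PySem.Dict String Int)) (ik : String) :
    ∀ (l : List (String × Int)) (s : PySem.Dict Int (PySem.Dict Int Int) × Int),
    s.1.contains 0 = true → ((pvBLoop1 att ik l s).1).contains 0 = true := by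
  intro l
  induction l with
  | nil => intro s hs; exact hs
  | cons q rest ih =>
    intro s hs
    rw [pvBLoop1_cons]
    exact ih _ (pvBumpB_contains0 _ _ _ (Or.inr hs))

lemma pvBLoop1_hit0 (att : PySem.Dict String (PySem.Dict String Int)) (ik : String) :
    ∀ (l : List (String × Int)) (s : PySem.Dict Int (PySem.Dict Int Int) × Int),
    (∃ q ∈ l, q.2 = 0) → ((pvBLoop1 att ik l s).1).contains 0 = true := by
  intro l
  induction l with
  | nil => rintro s ⟨q, hq, _⟩; cases hq
  | cons q rest ih =>
    rintro s ⟨q', hq', hq0⟩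
    rw [pvBLoop1_cons]
    rcases List.mem_cons.mp hq' with rfl | hmem
    · exact pvBLoop1_mono0 att ik rest _ (pvBumpB_contains0 _ _ _ (Or.inl hq0))
    · exact ih _ ⟨q', hmem, hq0⟩

lemma pvBLoop2_mono0 (tr : PySem.Dict String (PySem.Dict String Int)) (ik : String) :
    ∀ (l : List (String × Int)) (s : PySem.Dict Int (PySem.Dict Int Int) × Int),
    s.1.contains 0 = true → ((pvBLoop2 tr ik l s).1).contains 0 = true := by
  intro l
  induction l with
  | nil => intro s hs; exact hs
  | cons q rest ih =>
    intro s hs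
    rw [pvBLoop2_cons]
    apply ih
    by_cases hm : pvMatchedB tr ik q.1
    · simpa [hm] using hs
    · simp only [hm, Bool.false_eq_true, if_false]
      exact pvBumpB_contains0 _ _ _ (Or.inr hs)

lemma pvBLoop2_hit0 (tr : PySem.Dict String (PySem.Dict String Int)) (ik : String) :
    ∀ (l : List (String × Int)) (s : PySem.Dict Int (PySem.Dict Int Int) × Int),
    (∃ q ∈ l, pvMatchedB tr ik q.1 = false) → ((pvBLoop2 tr ik l s).1).contains 0 = true := by
  intro l
  induction l with
  | nil => rintro s ⟨q, hq, _⟩; cases hq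
  | cons q rest ih =>
    rintro s ⟨q', hq', hm⟩
    rw [pvBLoop2_cons]
    rcases List.mem_cons.mp hq' with rfl | hmem
    · rw [hm]
      simp only [Bool.false_eq_true, if_false]
      exact pvBLoop2_mono0 tr ik rest _ (pvBumpB_contains0 _ _ _ (Or.inl rfl))
    · exact ih _ ⟨q', hmem, hm⟩

lemma pvPassB1_mono0 (att : PySem.Dict String (PySem.Dict String Int)) :
    ∀ (ts : List (String × List (String × Int))) (s : PySem.Dict Int (PySem.Dict Int Int) × Int),
    s.1.contains 0 = true →
    ((ts.foldl (fun s p => pvBLoop1 att p.1 p.2.reverse s) s).1).contains 0 = true := by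
  intro ts
  induction ts with
  | nil => intro s hs; exact hs
  | cons a rest ih =>
    intro s hs
    rw [List.foldl_cons]
    exact ih _ (pvBLoop1_mono0 att a.1 a.2.reverse s hs)

lemma pvPassB1_hit0 (att : PySem.Dict String (PySem.Dict String Int)) :
    ∀ (ts : List (String × List (String × Int))) (s : PySem.Dict Int (PySem.Dict Int Int) × Int),
    (∃ p ∈ ts, ∃ q ∈ p.2, q.2 = (0:Int)) →
    ((ts.foldl (fun s p => pvBLoop1 att p.1 p.2.reverse s) s).1).contains 0 = true := by
  intro ts
  induction ts with
  | nil => rintro s ⟨p, hp, _⟩; cases hp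
  | cons a rest ih =>
    rintro s ⟨p, hp, q, hq, h0⟩
    rw [List.foldl_cons]
    rcases List.mem_cons.mp hp with rfl | hmem
    · exact pvPassB1_mono0 att rest _
        (pvBLoop1_hit0 att p.1 p.2.reverse s ⟨q, List.mem_reverse.mpr hq, h0⟩)
    · exact ih _ ⟨p, hmem, q, hq, h0⟩

lemma pvPassB2_mono0 (tr : PySem.Dict String (PySem.Dict String Int)) :
    ∀ (ts : List (String × List (String × Int))) (s : PySem.Dict Int (PySem.Dict Int Int) × Int),
    s.1.contains 0 = true →
    ((ts.foldl (fun s p => pvBLoop2 tr p.1 p.2.reverse s) s).1).contains 0 = true := by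
  intro ts
  induction ts with
  | nil => intro s hs; exact hs
  | cons a rest ih =>
    intro s hs
    rw [List.foldl_cons]
    exact ih _ (pvBLoop2_mono0 tr a.1 a.2.reverse s hs)

lemma pvPassB2_hit0 (tr : PySem.Dict String (PySem.Dict String Int)) :
    ∀ (ts : List (String × List (String × Int))) (s : PySem.Dict Int (PySem.Dict Int Int) × Int),
    (∃ p ∈ ts, ∃ q ∈ p.2, pvMatchedB tr p.1 q.1 = false) →
    ((ts.foldl (fun s p => pvBLoop2 tr p.1 p.2.reverse s) s).1).contains 0 = true := by
  intro ts
  induction ts with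
  | nil => rintro s ⟨p, hp, _⟩; cases hp
  | cons a rest ih =>
    rintro s ⟨p, hp, q, hq, hm⟩
    rw [List.foldl_cons]
    rcases List.mem_cons.mp hp with rfl | hmem
    · exact pvPassB2_mono0 tr rest _
        (pvBLoop2_hit0 tr p.1 p.2.reverse s ⟨q, List.mem_reverse.mpr hq, hm⟩)
    · exact ih _ ⟨p, hmem, q, hq, hm⟩

-- ===== VERDICT (by name: the statement is the Claim_ definition above) =====
theorem get_cfx_mat_spec : Claim_equal_get_cfx_mat := by
  intro truth attempt totaln _ hPre
  obtain ⟨hndT, hndA, hndTi, hndAi, hz⟩ := hPre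
  unfold Spec_get_cfx_mat get_cfx_mat get_cfx_mat_alt
  rw [show PySem.Dict.mk (attempt.map (fun p => (p.1, PySem.Dict.mk p.2))) = pvDictOf attempt from rfl,
      show PySem.Dict.mk (truth.map (fun p => (p.1, PySem.Dict.mk p.2))) = pvDictOf truth from rfl]
  dsimp only
  -- pass 1
  have hy0 : pvDictOf attempt = pvYOf attempt (fun _ _ => true) := by
    unfold pvDictOf pvYOf; simp
  have h1 : (truth.map (fun p => (p.1, PySem.Dict.mk p.2))).foldl
        (fun s p => pvALoop1 p.1 p.2.items.reverse s)
        (pvDictOf attempt, (PySem.Dict.empty : PySem.Dict Int (PySem.Dict Int Int)), (0 : Int))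
      = (pvYOf attempt (fun k jk => !(pvMatchedIn truth k jk)),
         truth.foldl (fun s p => pvBLoop1 (pvDictOf attempt) p.1 p.2.reverse s)
           ((PySem.Dict.empty : PySem.Dict Int (PySem.Dict Int Int)), (0 : Int))) := by
    rw [List.foldl_map]
    have h := pvPass1 attempt hndA truth hndT hndTi (fun _ _ => true)
      PySem.Dict.empty 0 (fun _ _ _ => rfl)
    simp only [Bool.true_and] at h
    rw [← hy0] at h
    exact h
  rw [show (pvDictOf truth).items = truth.map (fun p => (p.1, PySem.Dict.mk p.2)) from rfl]
  rw [h1]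
  dsimp only
  -- pass 2
  have h2 : ∀ s : PySem.Dict Int (PySem.Dict Int Int) × Int,
      (attempt.map (fun p => (p.1, PySem.Dict.mk (p.2.filter (fun q => !(pvMatchedIn truth p.1 q.1)))))).foldl
        (fun s p => p.2.items.reverse.foldl (fun t q => (pvBumpA t.1 0 q.2, t.2 + 1)) s) s
      = attempt.foldl (fun s p => pvBLoop2 (pvDictOf truth) p.1 p.2.reverse s) s := by
    intro s
    rw [List.foldl_map]
    dsimp only
    have hbody : (fun (s : PySem.Dict Int (PySem.Dict Int Int) × Int) (p : String × List (String × Int)) =>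
          ((p.2.filter (fun q => !(pvMatchedIn truth p.1 q.1))).reverse).foldl
            (fun t q => (pvBumpA t.1 0 q.2, t.2 + 1)) s)
        = (fun s p => pvBLoop2 (pvDictOf truth) p.1 p.2.reverse s) := by
      funext s p
      rw [← List.filter_reverse, List.foldl_filter]
      unfold pvBLoop2
      have hf : (fun (t : PySem.Dict Int (PySem.Dict Int Int) × Int) (q : String × Int) =>
            if (!(pvMatchedIn truth p.1 q.1)) = true then (pvBumpA t.1 0 q.2, t.2 + 1) else t)
          = (fun (t : PySem.Dict Int (PySem.Dict Int Int) × Int) (q : String × Int) =>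
            if pvMatchedB (pvDictOf truth) p.1 q.1 = true then t
            else (pvBumpB t.1 0 q.2, t.2 + 1)) := by
        funext t q
        rw [pvMatchedB_eq truth hndT p.1 q.1, pvBump_eq]
        cases pvMatchedIn truth p.1 q.1 <;> rfl
      rw [hf]
    rw [hbody]
  rw [show (pvYOf attempt (fun k jk => !(pvMatchedIn truth k jk))).items
        = attempt.map (fun p => (p.1, PySem.Dict.mk (p.2.filter (fun q => !(pvMatchedIn truth p.1 q.1))))) from rfl,
      h2]
  simp only [Prod.mk.eta]
  -- final assignment cm[0][0] = totaln - rt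
  cases totaln with
  | none => rfl
  | some t =>
    have hhz : pvHitsZero truth attempt = true := by
      rcases hz with hz | hz
      · cases hz
      · exact hz
    have hc0 : ((attempt.foldl (fun s p => pvBLoop2 (pvDictOf truth) p.1 p.2.reverse s)
        (truth.foldl (fun s p => pvBLoop1 (pvDictOf attempt) p.1 p.2.reverse s)
          ((PySem.Dict.empty : PySem.Dict Int (PySem.Dict Int Int)), (0 : Int)))).1).contains 0 = true := by
      unfold pvHitsZero at hhz
      rcases Bool.or_eq_true_iff.mp hhz with h | h
      · obtain ⟨p, hp, hq⟩ := List.any_eq_true.mp h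
        obtain ⟨q, hq', h0⟩ := List.any_eq_true.mp hq
        exact pvPassB2_mono0 (pvDictOf truth) attempt _
          (pvPassB1_hit0 (pvDictOf attempt) truth _ ⟨p, hp, q, hq', by simpa using h0⟩)
      · obtain ⟨p, hp, hq⟩ := List.any_eq_true.mp h
        obtain ⟨q, hq', h0⟩ := List.any_eq_true.mp hq
        refine pvPassB2_hit0 (pvDictOf truth) attempt _ ⟨p, hp, q, hq', ?_⟩
        rw [pvMatchedB_eq truth hndT p.1 q.1]
        simpa using h0
    rw [PySem.Dict.contains_eq_isSome_get?] at hc0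
    obtain ⟨row, hrow⟩ := Option.isSome_iff_exists.mp hc0
    rw [hrow]
    rw [show ((attempt.foldl (fun s p => pvBLoop2 (pvDictOf truth) p.1 p.2.reverse s)
        (truth.foldl (fun s p => pvBLoop1 (pvDictOf attempt) p.1 p.2.reverse s)
          ((PySem.Dict.empty : PySem.Dict Int (PySem.Dict Int Int)), (0 : Int)))).1).getD 0 PySem.Dict.empty
      = row from by simp [PySem.Dict.getD, hrow]]

@[simp] theorem get_cfx_mat_raises : Claim_raises_get_cfx_mat := by
  unfold Claim_raises_get_cfx_mat
  constructor
  · rintro truth attempt totaln _ ⟨_, _, _, _, hts, hhz⟩ ⟨_, _, _, _, hz⟩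
    rcases hz with hz | hz
    · exact hts hz
    · rw [hhz] at hz; cases hz
  · exact ⟨by decide, by decide, by decide⟩
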